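-- pv_equiv track=rewrite | github.com/oculi-s/Programmers | PRG_L3_PY/불량 사용자.py | solution
-- ===== SOURCE A (Python) =====
-- from itertools import product
--
-- def solution(user_id, banned_id):
--     g = [set() for _ in range(len(banned_id))]
--     for i, x in enumerate(banned_id):
--         for y in user_id:
--             if len(x) == len(y):
--                 if not any(a != '*' and a != b for a, b in zip(x,y)):
--                     g[i].add(y)
--     v = []
--     for x in product(*g):
--         if len(x) == len(set(x)):
--             if not set(x) in v:
--                 v.append(set(x))
--     return len(v)
-- ===== SOURCE B (Python) =====
-- def solution(user_id, banned_id):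
--     def matches(pat, uid):
--         return len(pat) == len(uid) and all(a == '*' or a == b for a, b in zip(pat, uid))
--
--     g = [{u for u in user_id if matches(p, u)} for p in banned_id]
--     result = set()
--
--     def recurse(i, used):
--         if i == len(banned_id):
--             result.add(frozenset(used))
--             return
--         for u in g[i]:
--             if u not in used:
--                 recurse(i + 1, used | {u})
--
--     recurse(0, set())
--     return len(result)
-- ===== Notes on version B (the rewrite author's own statement) =====
-- stated objective: alternative
-- what changed: Replaces the flat itertools.product enumeration plus per-tuple distinctness filter and linear dedup list with recursive DFS backtracking that carries a running 'used' set, prunes duplicate-user branches early, and records frozensets into a result set.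
import Mathlib
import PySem

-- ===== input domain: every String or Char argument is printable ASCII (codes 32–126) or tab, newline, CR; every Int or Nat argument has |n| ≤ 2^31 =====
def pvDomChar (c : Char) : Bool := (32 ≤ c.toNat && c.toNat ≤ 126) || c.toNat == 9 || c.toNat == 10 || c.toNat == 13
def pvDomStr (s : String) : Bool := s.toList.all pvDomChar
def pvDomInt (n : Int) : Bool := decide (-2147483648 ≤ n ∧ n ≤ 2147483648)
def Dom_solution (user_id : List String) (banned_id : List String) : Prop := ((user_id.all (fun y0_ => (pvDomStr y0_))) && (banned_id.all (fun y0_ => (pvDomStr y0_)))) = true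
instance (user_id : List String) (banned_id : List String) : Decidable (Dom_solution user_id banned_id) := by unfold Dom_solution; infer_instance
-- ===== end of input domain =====

-- B replaces A's flat product+filter+dedup enumeration by DFS backtracking with a running 'used'
-- set (objective: alternative decomposition; early pruning of duplicate-user branches).
-- The returned count never depends on Python's set iteration order, so ports use insertion order.

-- ===== PORT A =====
-- itertools.product(*g), leftmost component varying slowest
def pvProd : List (List String) → List (List String)
  | [] => [[]]
  | s :: rest => s.flatMap (fun a => (pvProd rest).map (fun x => a :: x))

def solution (user_id : List String) (banned_id : List String) : Int :=
  let g : List (PySem.Set String) := banned_id.map (fun x =>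
    user_id.foldl (fun s y =>
      if PySem.Str.len x == PySem.Str.len y &&
         !((x.toList.zip y.toList).any (fun ab => decide (ab.1 ≠ '*') && decide (ab.1 ≠ ab.2)))
      then PySem.Set.add s y else s) PySem.Set.empty)
  -- 'set(x) in v' compares sets by membership: ported as List.any with Set.equal
  let v : List (PySem.Set String) := (pvProd g).foldl (fun v x =>
      if x.length == (PySem.Set.ofList x).length then
        if v.any (fun s => PySem.Set.equal s (PySem.Set.ofList x)) then v
        else v ++ [PySem.Set.ofList x]
      else v) []
  (v.length : Int)

-- ===== PORT B =====
def pvMatchB (pat uid : String) : Bool :=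
  PySem.Str.len pat == PySem.Str.len uid &&
  (pat.toList.zip uid.toList).all (fun ab => ab.1 == '*' || ab.1 == ab.2)

-- recurse(i, used): at the leaf 'result.add(frozenset(used))' — frozenset equality is set
-- equality, ported as List.any with Set.equal (BEq on the underlying lists is order-sensitive)
def pvRec : List (PySem.Set String) → PySem.Set String → List (PySem.Set String) → List (PySem.Set String)
  | [], used, res => if res.any (fun s => PySem.Set.equal s used) then res else res ++ [used]
  | c :: rest, used, res =>
      c.foldl (fun r u => if PySem.Set.contains used u then r
                          else pvRec rest (PySem.Set.add used u) r) res

def solution_alt (user_id : List String) (banned_id : List String) : Int :=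
  let g : List (PySem.Set String) := banned_id.map (fun p =>
    PySem.Set.ofList (user_id.filter (fun u => pvMatchB p u)))
  ((pvRec g PySem.Set.empty []).length : Int)

-- ===== PRECONDITION & SPEC =====
def Spec_solution (user_id : List String) (banned_id : List String) (out : Int) : Prop := out = solution_alt user_id banned_id
instance (user_id : List String) (banned_id : List String) (out : Int) : Decidable (Spec_solution user_id banned_id out) := by unfold Spec_solution; infer_instance

-- ===== CLAIM (what is proved, stated in full; the proofs are below) =====
def Claim_equal_solution : Prop := ∀ (user_id : List String) (banned_id : List String), Dom_solution user_id banned_id → Spec_solution user_id banned_id (solution user_id banned_id)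

-- ===== LEMMAS AND PROOFS =====

-- A's dedup-append step, shared shape of both ports' recording of a new set
def pvStep (r : List (PySem.Set String)) (s : PySem.Set String) : List (PySem.Set String) :=
  if r.any (fun t => PySem.Set.equal t s) then r else r ++ [s]

-- 'this tuple can be added to used one element at a time without collision'
def pvDistinct (used : PySem.Set String) : List String → Bool
  | [] => true
  | a :: x => !PySem.Set.contains used a && pvDistinct (PySem.Set.add used a) x

theorem pv_foldl_congr {α γ : Type} (l : List α) (f g : γ → α → γ) (init : γ)
    (h : ∀ r a, f r a = g r a) : l.foldl f init = l.foldl g init := by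
  have hf : f = g := funext (fun r => funext (h r))
  rw [hf]

theorem pv_not_any_eq_all {α : Type} (f : α → Bool) (l : List α) :
    (!(l.any f)) = l.all (fun a => !(f a)) := by
  induction l with
  | nil => rfl
  | cons a l ih => simp [List.any_cons, List.all_cons, Bool.not_or, ih]

theorem pv_cond_eq (x y : String) :
    (PySem.Str.len x == PySem.Str.len y &&
      !((x.toList.zip y.toList).any (fun ab => decide (ab.1 ≠ '*') && decide (ab.1 ≠ ab.2))))
    = pvMatchB x y := by
  unfold pvMatchB
  rw [pv_not_any_eq_all]
  have hf : (fun ab : Char × Char => !(decide (ab.1 ≠ '*') && decide (ab.1 ≠ ab.2)))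
      = (fun ab : Char × Char => ab.1 == '*' || ab.1 == ab.2) := by
    funext ab
    by_cases h1 : ab.1 = '*' <;> by_cases h2 : ab.1 = ab.2 <;> simp [h1, h2]
  rw [hf]

theorem pv_fold_filter (p : String → Bool) (l : List String) (s : PySem.Set String) :
    l.foldl (fun s y => if p y then PySem.Set.add s y else s) s
      = (l.filter p).foldl PySem.Set.add s := by
  induction l generalizing s with
  | nil => rfl
  | cons a l ih =>
    by_cases h : p a <;> simp [List.foldl_cons, h, ih]

theorem pv_g_eq (user_id : List String) (x : String) :
    user_id.foldl (fun s y =>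
      if PySem.Str.len x == PySem.Str.len y &&
         !((x.toList.zip y.toList).any (fun ab => decide (ab.1 ≠ '*') && decide (ab.1 ≠ ab.2)))
      then PySem.Set.add s y else s) PySem.Set.empty
    = PySem.Set.ofList (user_id.filter (fun u => pvMatchB x u)) := by
  simp only [pv_cond_eq]
  rw [pv_fold_filter (fun y => pvMatchB x y) user_id PySem.Set.empty, PySem.Set.ofList_eq_foldl]
  rfl

theorem pv_len_fold_le (x : List String) (used : PySem.Set String) :
    (x.foldl PySem.Set.add used).length ≤ used.length + x.length := by
  induction x generalizing used with
  | nil => simp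
  | cons a x ih =>
    simp only [List.foldl_cons, List.length_cons]
    have h := ih (PySem.Set.add used a)
    have h2 : (PySem.Set.add used a).length ≤ used.length + 1 := by
      by_cases hm : a ∈ used
      · simp [PySem.Set.add_of_mem hm]
      · simp [PySem.Set.add_of_not_mem hm]
    omega

theorem pv_len_iff (x : List String) (used : PySem.Set String) :
    ((used.length + x.length) == (x.foldl PySem.Set.add used).length) = pvDistinct used x := by
  induction x generalizing used with
  | nil => simp [pvDistinct]
  | cons a x ih =>
    simp only [List.foldl_cons, List.length_cons, pvDistinct]
    by_cases hm : a ∈ used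
    · have hc : PySem.Set.contains used a = true := (PySem.Set.contains_iff used a).mpr hm
      rw [hc, PySem.Set.add_of_mem hm]
      have h2 := pv_len_fold_le x used
      simp only [Bool.not_true, Bool.false_and]
      have h3 : ¬ (used.length + (x.length + 1) = (x.foldl PySem.Set.add used).length) := by omega
      exact beq_eq_false_iff_ne.mpr h3
    · have hc : PySem.Set.contains used a = false := by
        rw [← Bool.not_eq_true]
        exact fun h => hm ((PySem.Set.contains_iff used a).mp h)
      rw [hc]
      simp only [Bool.not_false, Bool.true_and]
      rw [← ih (PySem.Set.add used a), PySem.Set.add_of_not_mem hm]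
      simp only [List.length_append, List.length_cons, List.length_nil]
      congr 1
      omega

theorem pv_foldl_flatMap {α β γ : Type} (f : γ → β → γ) (g : α → List β) (l : List α) (init : γ) :
    List.foldl f init (l.flatMap g) = l.foldl (fun acc a => List.foldl f acc (g a)) init := by
  induction l generalizing init with
  | nil => rfl
  | cons a l ih => simp [List.flatMap_cons, List.foldl_append, ih]

theorem pv_foldl_const {α γ : Type} (l : List α) (r : γ) :
    l.foldl (fun r _ => r) r = r := by
  induction l generalizing r with
  | nil => rfl
  | cons a l ih => simp [List.foldl_cons, ih]

theorem pv_main (gs : List (PySem.Set String)) (used : PySem.Set String)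
    (res : List (PySem.Set String)) :
    pvRec gs used res
      = (pvProd gs).foldl (fun r x =>
          if pvDistinct used x then pvStep r (x.foldl PySem.Set.add used) else r) res := by
  induction gs generalizing used res with
  | nil => simp [pvRec, pvProd, pvDistinct, pvStep]
  | cons c rest ih =>
    simp only [pvRec, pvProd, pv_foldl_flatMap]
    apply pv_foldl_congr
    intro r a
    rw [List.foldl_map]
    have hunf : ∀ x : List String, pvDistinct used (a :: x)
        = (!PySem.Set.contains used a && pvDistinct (PySem.Set.add used a) x) := fun _ => rfl
    by_cases hc : PySem.Set.contains used a
    · simp only [hc, if_true]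
      symm
      calc (pvProd rest).foldl (fun r x =>
              if pvDistinct used (a :: x) then pvStep r ((a :: x).foldl PySem.Set.add used) else r) r
          = (pvProd rest).foldl (fun r _ => r) r := by
            apply pv_foldl_congr
            intro r' x
            rw [hunf x, hc]
            simp only [Bool.not_true, Bool.false_and, Bool.false_eq_true, if_false]
        _ = r := pv_foldl_const _ r
    · simp only [hc]
      rw [ih (PySem.Set.add used a) r]
      apply pv_foldl_congr
      intro r' x
      rw [hunf x, eq_false_of_ne_true hc]
      simp only [Bool.not_false, Bool.true_and, List.foldl_cons]

theorem pv_a_eq (gs : List (PySem.Set String)) :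
    (pvProd gs).foldl (fun v x =>
      if x.length == (PySem.Set.ofList x).length then
        if v.any (fun s => PySem.Set.equal s (PySem.Set.ofList x)) then v
        else v ++ [PySem.Set.ofList x]
      else v) []
    = pvRec gs PySem.Set.empty [] := by
  rw [pv_main]
  apply pv_foldl_congr
  intro r x
  have h2 : (x.length == (PySem.Set.ofList x).length) = pvDistinct PySem.Set.empty x := by
    have h := pv_len_iff x PySem.Set.empty
    simpa [PySem.Set.empty, PySem.Set.ofList_eq_foldl] using h
  rw [h2]
  by_cases hd : pvDistinct PySem.Set.empty x = true
  · rw [if_pos hd, if_pos hd, pvStep, PySem.Set.ofList_eq_foldl]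
    simp only [PySem.Set.empty]
  · rw [if_neg hd, if_neg hd]

-- ===== VERDICT (by name: the statement is the Claim_ definition above) =====
theorem solution_spec : Claim_equal_solution := by
  intro user_id banned_id _
  simp only [Spec_solution, solution, solution_alt, pv_g_eq, pv_a_eq]
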